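-- pv_equiv track=rewrite | github.com/chaneeh/Kaggle | cell-segmentation/utils.py | get_net_input_size
-- ===== SOURCE A (Python) =====
-- def get_net_input_size(image_size, num_block):
--     network_input_size = image_size
--     for _ in range(num_block):
--         #assert network_input_size % 2 == 0, network_input_size
--         network_input_size = (network_input_size + 4) // 2
--     network_input_size += 4
--     for _ in range(num_block):
--         network_input_size = network_input_size * 2 + 4
--     return network_input_size
-- ===== SOURCE B (Python) =====
-- def get_net_input_size(image_size, num_block):
--     x = image_size
--     for _ in range(num_block):
--         x = (x + 4) // 2
--     n = max(num_block, 0)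
--     p = 2 ** n
--     return (x + 4) * p + 4 * (p - 1)
-- ===== Notes on version B (the rewrite author's own statement) =====
-- stated objective: simpler
-- what changed: The second loop (y -> 2y+4 repeated num_block times) is replaced by its closed form (x+4)*2^n + 4*(2^n-1); the floor-division shrink loop, which has no closed form, is kept.
import Mathlib
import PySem

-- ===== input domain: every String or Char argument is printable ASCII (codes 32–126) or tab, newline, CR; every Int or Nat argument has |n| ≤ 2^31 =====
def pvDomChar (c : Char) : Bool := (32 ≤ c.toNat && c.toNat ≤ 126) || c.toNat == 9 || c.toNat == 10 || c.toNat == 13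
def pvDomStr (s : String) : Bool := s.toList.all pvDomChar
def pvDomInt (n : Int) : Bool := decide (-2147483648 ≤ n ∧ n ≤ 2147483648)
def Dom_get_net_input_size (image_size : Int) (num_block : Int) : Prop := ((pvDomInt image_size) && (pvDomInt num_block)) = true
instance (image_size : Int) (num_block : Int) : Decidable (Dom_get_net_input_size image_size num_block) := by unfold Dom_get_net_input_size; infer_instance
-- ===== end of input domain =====

-- ===== PORT A =====
-- B replaces A's second loop by its closed form (x+4)*2^n + 4*(2^n-1); same values, simpler.
def get_net_input_size (image_size : Int) (num_block : Int) : Int :=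
  let y := (List.range num_block.toNat).foldl (fun s _ => PySem.Int.floordiv (s + 4) 2) image_size
  let z := y + 4
  (List.range num_block.toNat).foldl (fun s _ => s * 2 + 4) z

-- ===== PORT B =====
def get_net_input_size_alt (image_size : Int) (num_block : Int) : Int :=
  let x := (List.range num_block.toNat).foldl (fun s _ => PySem.Int.floordiv (s + 4) 2) image_size
  let n := (max num_block 0).toNat
  let p : Int := 2 ^ n
  (x + 4) * p + 4 * (p - 1)

-- ===== PRECONDITION & SPEC =====
def Spec_get_net_input_size (image_size : Int) (num_block : Int) (out : Int) : Prop := out = get_net_input_size_alt image_size num_block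
instance (image_size : Int) (num_block : Int) (out : Int) : Decidable (Spec_get_net_input_size image_size num_block out) := by unfold Spec_get_net_input_size; infer_instance

-- ===== CLAIM (what is proved, stated in full; the proofs are below) =====
def Claim_equal_get_net_input_size : Prop := ∀ (image_size : Int) (num_block : Int), Dom_get_net_input_size image_size num_block → Spec_get_net_input_size image_size num_block (get_net_input_size image_size num_block)

-- ===== LEMMAS AND PROOFS =====

-- ===== VERDICT (by name: the statement is the Claim_ definition above) =====
theorem pv_double_loop (n : Nat) (z : Int) :
    (List.range n).foldl (fun s _ => s * 2 + 4) z = z * 2 ^ n + 4 * (2 ^ n - 1) := by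
  induction n generalizing z with
  | zero => simp
  | succ k ih =>
    rw [List.range_succ, List.foldl_append]
    simp only [List.foldl_cons, List.foldl_nil]
    rw [show (List.range k).foldl (fun s _ => s * 2 + 4) z = z * 2 ^ k + 4 * (2 ^ k - 1) from ih z]
    ring

theorem get_net_input_size_spec : Claim_equal_get_net_input_size := by
  intro image_size num_block _
  unfold Spec_get_net_input_size get_net_input_size get_net_input_size_alt
  have hn : (max num_block 0).toNat = num_block.toNat := by omega
  simp only [hn, pv_double_loop]
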